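-- pv_equiv track=rewrite | github.com/DEugene04/Review-Sentiment-NLP | backend/import_reviews.py | detect_column
-- ===== SOURCE A (Python) =====
-- from typing import Any, Dict, List, Optional
--
-- def detect_column(cols: List[str], aliases: set[str]):
--     # Find exact match with aliases
--     for c in cols:
--         if c in aliases:
--             return c
--     # Find words that matches with aliases
--     for c in cols:
--         if any(a in c for a in aliases):
--             return c
--     return None
-- ===== SOURCE B (Python) =====
-- def detect_column(cols, aliases):
--     # One pass collecting both candidates; exact match still beats substring match.
--     first_exact = None
--     first_substr = None
--     for c in cols:
--         if first_exact is None and c in aliases: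
--             first_exact = c
--         if first_substr is None and any(a in c for a in aliases):
--             first_substr = c
--     return first_exact if first_exact is not None else first_substr
-- ===== Notes on version B (the rewrite author's own statement) =====
-- stated objective: alternative
-- what changed: Replaces A's two sequential early-return scans over cols with a single traversal maintaining two write-once slots (first exact match, first substring match), selecting the exact slot first after the loop.
import Mathlib
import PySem

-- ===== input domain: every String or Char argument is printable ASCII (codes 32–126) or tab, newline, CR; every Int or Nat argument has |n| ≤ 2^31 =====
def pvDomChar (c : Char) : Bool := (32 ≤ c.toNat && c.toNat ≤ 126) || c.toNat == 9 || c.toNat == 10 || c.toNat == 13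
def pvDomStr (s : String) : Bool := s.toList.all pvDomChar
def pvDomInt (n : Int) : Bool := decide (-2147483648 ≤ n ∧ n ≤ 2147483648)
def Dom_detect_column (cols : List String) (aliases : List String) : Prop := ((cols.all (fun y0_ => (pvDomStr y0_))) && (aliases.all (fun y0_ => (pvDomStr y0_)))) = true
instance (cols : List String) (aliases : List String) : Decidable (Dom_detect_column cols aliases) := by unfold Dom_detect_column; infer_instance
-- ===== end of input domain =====

-- B fuses A's two early-return scans into one traversal with two write-once slots (objective: alternative decomposition).


-- ===== PORT A =====
-- first loop: return first c with c in aliases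
def dcExactScan (aliases : List String) : List String → Option String
  | [] => none
  | c :: rest => if aliases.contains c then some c else dcExactScan aliases rest

-- second loop: return first c with any(a in c for a in aliases)
def dcSubScan (aliases : List String) : List String → Option String
  | [] => none
  | c :: rest => if aliases.any (fun a => PySem.Str.isIn a c) then some c else dcSubScan aliases rest

def detect_column (cols : List String) (aliases : List String) : Option String :=
  match dcExactScan aliases cols with
  | some c => some c
  | none => dcSubScan aliases cols

-- ===== PORT B =====
def detect_column_alt (cols : List String) (aliases : List String) : Option String :=
  let st := cols.foldl (fun (st : Option String × Option String) c =>
    let e := if st.1.isNone && aliases.contains c then some c else st.1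
    let s := if st.2.isNone && aliases.any (fun a => PySem.Str.isIn a c) then some c else st.2
    (e, s)) (none, none)
  match st.1 with
  | some c => some c
  | none => st.2

-- ===== PRECONDITION & SPEC =====
def Spec_detect_column (cols : List String) (aliases : List String) (out : Option String) : Prop := out = detect_column_alt cols aliases
instance (cols : List String) (aliases : List String) (out : Option String) : Decidable (Spec_detect_column cols aliases out) := by unfold Spec_detect_column; infer_instance

-- ===== CLAIM (what is proved, stated in full; the proofs are below) =====
def Claim_equal_detect_column : Prop := ∀ (cols : List String) (aliases : List String), Dom_detect_column cols aliases → Spec_detect_column cols aliases (detect_column cols aliases)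

-- ===== LEMMAS AND PROOFS =====
lemma dc_fold_spec (aliases : List String) (cols : List String) :
    ∀ e s : Option String,
      cols.foldl (fun (st : Option String × Option String) c =>
        let e' := if st.1.isNone && aliases.contains c then some c else st.1
        let s' := if st.2.isNone && aliases.any (fun a => PySem.Str.isIn a c) then some c else st.2
        (e', s')) (e, s)
      = (e.orElse (fun _ => dcExactScan aliases cols), s.orElse (fun _ => dcSubScan aliases cols)) := by
  induction cols with
  | nil => intro e s; cases e <;> cases s <;> simp [Option.orElse, dcExactScan, dcSubScan]
  | cons c rest ih =>
    intro e s
    simp only [List.foldl_cons, ih]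
    cases e <;> cases s <;>
      simp [dcExactScan, dcSubScan, Option.orElse] <;> split_ifs <;> simp_all

-- ===== VERDICT (by name: the statement is the Claim_ definition above) =====
theorem detect_column_spec : Claim_equal_detect_column := by
  intro cols aliases _
  unfold Spec_detect_column detect_column detect_column_alt
  rw [dc_fold_spec]
  cases h : dcExactScan aliases cols <;> simp [Option.orElse]
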